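-- pv_equiv track=rewrite | github.com/tonmoy50/Indiana-University | Fall 2023/B503/Homework4/Problem3.py | maxIncSubarr
-- ===== SOURCE A (Python) =====
-- def maxIncSubarr(arr, n):
--     OPT = [0] * n
--     OPT[0] = 1
--     for i in range(1, n):
--         if arr[i] > arr[i - 1]:
--             OPT[i] = OPT[i - 1] + 1
--         else:
--             OPT[i] = 1
--
--     OPT_reversed = [0] * n
--     OPT_reversed[n - 1] = 1
--     for i in range(n - 2, -1, -1):
--         if arr[i] < arr[i + 1]:
--             OPT_reversed[i] = OPT_reversed[i + 1] + 1
--         else: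
--             OPT_reversed[i] = 1
--
--     max_subsequence = max(OPT)
--     for i in range(1, n - 1):
--         if arr[i - 1] < arr[i + 1]:
--             max_subsequence = max(max_subsequence, OPT[i - 1] + OPT_reversed[i + 1])
--
--     return max_subsequence
-- ===== SOURCE B (Python) =====
-- def maxIncSubarr(arr, n):
--     best = 1
--     cur = 1        # length of the increasing run ending at the current index
--     dele = 0       # longest increasing chain ending here with exactly one element deleted
--     prev_cur = 0   # run length ending at the previous index
--     for i in range(1, n):
--         new_del = dele + 1 if (dele > 0 and arr[i] > arr[i - 1]) else 0
--         if i >= 2 and arr[i] > arr[i - 2]: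
--             new_del = max(new_del, prev_cur + 1)
--         prev_cur = cur
--         cur = cur + 1 if arr[i] > arr[i - 1] else 1
--         dele = new_del
--         best = max(best, cur, dele)
--     return best
-- ===== Notes on version B (the rewrite author's own statement) =====
-- stated objective: alternative
-- what changed: Replaced A's three passes over two allocated arrays (forward OPT array, backward OPT_reversed array, then a combine loop) by a single forward pass maintaining O(1) state: the current run length and a DP value 'longest increasing chain ending here with exactly one element deleted'.
import Mathlib
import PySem

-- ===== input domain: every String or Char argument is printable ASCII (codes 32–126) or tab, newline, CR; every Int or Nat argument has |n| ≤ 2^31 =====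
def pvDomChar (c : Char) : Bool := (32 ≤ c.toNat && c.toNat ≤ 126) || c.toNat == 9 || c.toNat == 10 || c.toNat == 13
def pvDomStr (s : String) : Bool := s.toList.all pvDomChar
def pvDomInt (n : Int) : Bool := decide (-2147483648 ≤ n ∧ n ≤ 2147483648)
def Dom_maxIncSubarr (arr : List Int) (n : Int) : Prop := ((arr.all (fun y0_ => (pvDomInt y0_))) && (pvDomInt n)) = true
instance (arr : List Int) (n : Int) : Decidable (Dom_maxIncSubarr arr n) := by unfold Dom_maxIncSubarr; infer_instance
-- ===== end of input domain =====

-- B replaces A's three passes and two allocated arrays by a single forward pass with O(1)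
-- state (run length + a one-deletion DP value): a different algorithm, same return value.

-- ===== PORT A =====
def maxIncSubarr (arr : List Int) (n : Int) : Int :=
  let OPT0 : List Int := PySem.List.pySetD (List.replicate n.toNat 0) 0 1
  let OPT := (PySem.List.pyRange 1 n 1).foldl
    (fun OPT i =>
      PySem.List.pySetD OPT i
        (if PySem.List.pyGetD arr i 0 > PySem.List.pyGetD arr (i - 1) 0
         then PySem.List.pyGetD OPT (i - 1) 0 + 1 else 1)) OPT0
  let REV0 : List Int := PySem.List.pySetD (List.replicate n.toNat 0) (n - 1) 1
  let REV := (PySem.List.pyRange (n - 2) (-1) (-1)).foldl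
    (fun REV i =>
      PySem.List.pySetD REV i
        (if PySem.List.pyGetD arr i 0 < PySem.List.pyGetD arr (i + 1) 0
         then PySem.List.pyGetD REV (i + 1) 0 + 1 else 1)) REV0
  let ms := (PySem.List.max? OPT (fun y => y)).getD 0
  (PySem.List.pyRange 1 (n - 1) 1).foldl
    (fun m i =>
      if PySem.List.pyGetD arr (i - 1) 0 < PySem.List.pyGetD arr (i + 1) 0
      then max m (PySem.List.pyGetD OPT (i - 1) 0 + PySem.List.pyGetD REV (i + 1) 0)
      else m) ms

-- ===== PORT B =====
def maxIncSubarr_alt (arr : List Int) (n : Int) : Int :=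
  ((PySem.List.pyRange 1 n 1).foldl
    (fun (s : Int × Int × Int × Int) i =>
      let best := s.1
      let cur := s.2.1
      let dele := s.2.2.1
      let prev_cur := s.2.2.2
      let newDel0 : Int :=
        if 0 < dele ∧ PySem.List.pyGetD arr i 0 > PySem.List.pyGetD arr (i - 1) 0
        then dele + 1 else 0
      let newDel : Int :=
        if 2 ≤ i ∧ PySem.List.pyGetD arr i 0 > PySem.List.pyGetD arr (i - 2) 0
        then max newDel0 (prev_cur + 1) else newDel0
      let newCur : Int :=
        if PySem.List.pyGetD arr i 0 > PySem.List.pyGetD arr (i - 1) 0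
        then cur + 1 else 1
      (max (max best newCur) newDel, newCur, newDel, cur))
    (1, 1, 0, 0)).1

-- ===== PRECONDITION & SPEC =====
-- Pre_ excludes exactly the inputs where A raises: n ≤ 0 (OPT[0] assignment on an empty
-- list, IndexError) and 2 ≤ n > len(arr) (arr[i] IndexError); for n = 1 A never reads arr.
def Pre_maxIncSubarr (arr : List Int) (n : Int) : Prop :=
  1 ≤ n ∧ (n = 1 ∨ n ≤ PySem.List.len arr)
instance (arr : List Int) (n : Int) : Decidable (Pre_maxIncSubarr arr n) := by
  unfold Pre_maxIncSubarr; infer_instance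

def pvWitness_maxIncSubarr : List Int × Int := ([3, 1, 2], 3)

def Spec_maxIncSubarr (arr : List Int) (n : Int) (out : Int) : Prop := out = maxIncSubarr_alt arr n
instance (arr : List Int) (n : Int) (out : Int) : Decidable (Spec_maxIncSubarr arr n out) := by unfold Spec_maxIncSubarr; infer_instance

-- ===== CLAIM (what is proved, stated in full; the proofs are below) =====
def Claim_equal_maxIncSubarr : Prop := ∀ (arr : List Int) (n : Int), Dom_maxIncSubarr arr n → Pre_maxIncSubarr arr n → Spec_maxIncSubarr arr n (maxIncSubarr arr n)

-- ===== LEMMAS AND PROOFS =====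

def optF (a : ℕ → Int) : ℕ → Int
  | 0 => 1
  | j+1 => if a j < a (j+1) then optF a j + 1 else 1

def revF (a : ℕ → Int) (N : ℕ) (j : ℕ) : Int :=
  if h : N ≤ j + 1 then 1
  else if a j < a (j+1) then revF a N (j+1) + 1 else 1
termination_by N - j
decreasing_by omega

def dF (a : ℕ → Int) : ℕ → Int
  | 0 => 0
  | j+1 =>
    let b1 : Int := if 0 < dF a j ∧ a j < a (j+1) then dF a j + 1 else 0
    if 1 ≤ j ∧ a (j-1) < a (j+1) then max b1 (optF a (j-1) + 1) else b1

def bestF (a : ℕ → Int) : ℕ → Int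
  | 0 => 1
  | j+1 => max (max (bestF a j) (optF a (j+1))) (dF a (j+1))

def moF (a : ℕ → Int) : ℕ → Int
  | 0 => 1
  | j+1 => max (moF a j) (optF a (j+1))

def cF (a : ℕ → Int) (N : ℕ) : ℕ → Int
  | 0 => moF a (N-1)
  | m+1 => if a m < a (m+2) then max (cF a N m) (optF a m + revF a N (m+2)) else cF a N m

theorem optF_pos (a : ℕ → Int) (j : ℕ) : 1 ≤ optF a j := by
  induction j with
  | zero => simp [optF]
  | succ j ih => rw [optF]; split_ifs <;> omega

theorem revF_pos (a : ℕ → Int) (N j : ℕ) : 1 ≤ revF a N j := by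
  rw [revF.eq_def]
  split_ifs with h1 h2
  · omega
  · have := revF_pos a N (j+1); omega
  · omega
termination_by N - j
decreasing_by omega

theorem moF_pos (a : ℕ → Int) (m : ℕ) : 1 ≤ moF a m := by
  induction m with
  | zero => simp [moF]
  | succ m ih => rw [moF]; omega

theorem moF_mono (a : ℕ → Int) {m m' : ℕ} (h : m ≤ m') : moF a m ≤ moF a m' := by
  induction m' with
  | zero => simp_all
  | succ m' ih =>
      rcases Nat.eq_or_lt_of_le h with rfl | h'
      · rfl
      · have := ih (by omega); rw [moF]; omega

theorem opt_le_moF (a : ℕ → Int) {j m : ℕ} (h : j ≤ m) : optF a j ≤ moF a m := by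
  have h1 : optF a j ≤ moF a j := by
    cases j with
    | zero => simp [optF, moF]
    | succ j => rw [moF]; omega
  exact le_trans h1 (moF_mono a h)

theorem cF_mono (a : ℕ → Int) (N : ℕ) {m m' : ℕ} (h : m ≤ m') : cF a N m ≤ cF a N m' := by
  induction m' with
  | zero => simp_all
  | succ m' ih =>
      rcases Nat.eq_or_lt_of_le h with rfl | h'
      · rfl
      · have := ih (by omega); rw [cF]; split_ifs <;> omega

theorem cand_le_cF (a : ℕ → Int) (N : ℕ) {m i : ℕ} (h : i < m) (hc : a i < a (i+2)) :
    optF a i + revF a N (i+2) ≤ cF a N m := by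
  induction m with
  | zero => omega
  | succ m ih =>
      rcases Nat.eq_or_lt_of_le (Nat.le_of_lt_succ h) with rfl | h'
      · rw [cF]; simp [hc]
      · exact le_trans (ih h') (cF_mono a N (by omega))

theorem bestF_mono (a : ℕ → Int) {m m' : ℕ} (h : m ≤ m') : bestF a m ≤ bestF a m' := by
  induction m' with
  | zero => simp_all
  | succ m' ih =>
      rcases Nat.eq_or_lt_of_le h with rfl | h'
      · rfl
      · have := ih (by omega); rw [bestF]; omega

theorem dF_le_bestF (a : ℕ → Int) {j m : ℕ} (h : j ≤ m) : dF a j ≤ bestF a m := by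
  have h1 : dF a j ≤ bestF a j := by
    cases j with
    | zero => simp [dF, bestF]
    | succ j => rw [bestF]; omega
  exact le_trans h1 (bestF_mono a h)

theorem moF_le_bestF (a : ℕ → Int) (m : ℕ) : moF a m ≤ bestF a m := by
  induction m with
  | zero => simp [moF, bestF]
  | succ m ih => rw [moF, bestF]; omega

theorem rev_le_bound (a : ℕ → Int) (N j : ℕ) (h : j < N) : revF a N j ≤ (N : Int) - j := by
  rw [revF.eq_def]
  split_ifs with h1 h2
  · omega
  · have := rev_le_bound a N (j+1) (by omega)
    push_cast at *; omega
  · omega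
termination_by N - j
decreasing_by omega

theorem rev_one_lt (a : ℕ → Int) (N j : ℕ) (h : 1 < revF a N j) :
    j + 1 < N ∧ a j < a (j+1) ∧ revF a N j = revF a N (j+1) + 1 := by
  rw [revF.eq_def] at h ⊢
  split_ifs at h ⊢ with h1 h2
  · omega
  · exact ⟨by omega, h2, rfl⟩
  · omega

theorem rev_steps (a : ℕ → Int) (N : ℕ) : ∀ (t j : ℕ), (t : Int) + 1 < revF a N j → a (j+t) < a (j+t+1) := by
  intro t
  induction t with
  | zero => intro j h; exact (rev_one_lt a N j (by omega)).2.1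
  | succ t ih =>
      intro j h
      obtain ⟨h1, h2, h3⟩ := rev_one_lt a N j (by omega)
      have := ih (j+1) (by push_cast at *; omega)
      have e : j + 1 + t = j + (t+1) := by omega
      rw [e] at this
      exact this

theorem rev_ge (a : ℕ → Int) (N : ℕ) :
    ∀ (L p : ℕ), p + L < N → (∀ t, p ≤ t → t < p + L → a t < a (t+1)) → (L : Int) < revF a N p := by
  intro L
  induction L with
  | zero => intro p _ _; have := revF_pos a N p; push_cast; omega
  | succ L ih =>
      intro p hq hc
      have hstep : a p < a (p+1) := hc p (le_refl p) (by omega)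
      have h1 : revF a N p = revF a N (p+1) + 1 := by
        rw [revF.eq_def]; simp [show ¬ (N ≤ p + 1) by omega, hstep]
      have h2 := ih (p+1) (by omega) (fun t ht1 ht2 => hc t (by omega) (by omega))
      rw [h1]; push_cast at *; omega

theorem dF_succ_ge1 (a : ℕ → Int) (j : ℕ) (h1 : 0 < dF a j) (h2 : a j < a (j+1)) :
    dF a j + 1 ≤ dF a (j+1) := by
  rw [dF]
  simp only [h1, h2, and_self, if_true]
  split_ifs <;> omega

theorem dF_succ_ge2 (a : ℕ → Int) (j : ℕ) (h1 : 1 ≤ j) (h2 : a (j-1) < a (j+1)) :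
    optF a (j-1) + 1 ≤ dF a (j+1) := by
  rw [dF]
  simp only [h1, h2, and_self, if_true]
  omega

theorem grow (a : ℕ → Int) (N : ℕ) (i : ℕ) (hi : 1 ≤ i) (hc : a (i-1) < a (i+1)) :
    ∀ (t : ℕ), (t : Int) < revF a N (i+1) → optF a (i-1) + ((t:Int) + 1) ≤ dF a (i+1+t) := by
  intro t
  induction t with
  | zero =>
      intro _
      have := dF_succ_ge2 a i hi hc
      simpa using this
  | succ t ih =>
      intro h
      have ht : (t : Int) < revF a N (i+1) := by push_cast at h ⊢; omega
      have hd := ih ht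
      have hstep : a (i+1+t) < a (i+1+t+1) := rev_steps a N t (i+1) (by push_cast at h ⊢; omega)
      have hpos : 0 < dF a (i+1+t) := by have := optF_pos a (i-1); omega
      have := dF_succ_ge1 a (i+1+t) hpos hstep
      have e : i + 1 + t + 1 = i + 1 + (t+1) := by omega
      rw [e] at this
      push_cast at *; omega

theorem cand_le_bestF (a : ℕ → Int) (N : ℕ) (i : ℕ) (hi : 1 ≤ i) (hiN : i ≤ N - 2) (hN : 2 ≤ N)
    (hc : a (i-1) < a (i+1)) :
    optF a (i-1) + revF a N (i+1) ≤ bestF a (N-1) := by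
  have hrpos : 1 ≤ revF a N (i+1) := revF_pos a N (i+1)
  obtain ⟨r, hr⟩ : ∃ r : ℕ, revF a N (i+1) = ((r:ℕ):Int) + 1 :=
    ⟨(revF a N (i+1) - 1).toNat, by omega⟩
  have hg := grow a N i hi hc r (by omega)
  have hbound := rev_le_bound a N (i+1) (by omega)
  have hir : i + 1 + r ≤ N - 1 := by push_cast at hbound; omega
  calc optF a (i-1) + revF a N (i+1) = optF a (i-1) + ((r:Int) + 1) := by rw [hr]
    _ ≤ dF a (i+1+r) := hg
    _ ≤ bestF a (N-1) := dF_le_bestF a (by omega)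

theorem dF_struct (a : ℕ → Int) :
    ∀ (j : ℕ), 0 < dF a j → ∃ i, 1 ≤ i ∧ i < j ∧ a (i-1) < a (i+1) ∧
      dF a j ≤ optF a (i-1) + ((j - i : ℕ) : Int) ∧ (∀ t, i+1 ≤ t → t < j → a t < a (t+1)) := by
  intro j
  induction j with
  | zero => intro h; simp [dF] at h
  | succ j ih =>
      intro h
      by_cases hc2 : 1 ≤ j ∧ a (j-1) < a (j+1)
      · have hmax : dF a (j+1)
            = max (if 0 < dF a j ∧ a j < a (j+1) then dF a j + 1 else 0) (optF a (j-1) + 1) := by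
          rw [dF]; simp only [hc2, and_self, if_true]
        by_cases hb : dF a (j+1) ≤ optF a (j-1) + 1
        · exact ⟨j, hc2.1, by omega, hc2.2, by
            simpa [show j + 1 - j = 1 by omega] using hb, by omega⟩
        · have hcond : 0 < dF a j ∧ a j < a (j+1) := by
            by_contra hx
            rw [if_neg hx] at hmax
            have := optF_pos a (j-1)
            omega
          rw [if_pos hcond] at hmax
          obtain ⟨i, hi1, hi2, hi3, hi4, hi5⟩ := ih hcond.1
          refine ⟨i, hi1, by omega, hi3, ?_, ?_⟩
          · have e : ((j + 1 - i : ℕ) : Int) = ((j - i : ℕ) : Int) + 1 := by omega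
            rw [e]; omega
          · intro t ht1 ht2
            rcases Nat.lt_or_ge t j with h' | h'
            · exact hi5 t ht1 h'
            · have : t = j := by omega
              subst this; exact hcond.2
      · have hmax : dF a (j+1) = (if 0 < dF a j ∧ a j < a (j+1) then dF a j + 1 else 0) := by
          rw [dF]; simp only [hc2, if_false]
        have hcond : 0 < dF a j ∧ a j < a (j+1) := by
          by_contra hx; rw [if_neg hx] at hmax; omega
        rw [if_pos hcond] at hmax
        obtain ⟨i, hi1, hi2, hi3, hi4, hi5⟩ := ih hcond.1
        refine ⟨i, hi1, by omega, hi3, ?_, ?_⟩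
        · have e : ((j + 1 - i : ℕ) : Int) = ((j - i : ℕ) : Int) + 1 := by omega
          rw [e]; omega
        · intro t ht1 ht2
          rcases Nat.lt_or_ge t j with h' | h'
          · exact hi5 t ht1 h'
          · have : t = j := by omega
            subst this; exact hcond.2

theorem dF_le_cF (a : ℕ → Int) (N : ℕ) (hN : 2 ≤ N) {j : ℕ} (hj : j ≤ N - 1) :
    dF a j ≤ cF a N (N-2) := by
  by_cases hd : 0 < dF a j
  · obtain ⟨i, hi1, hi2, hi3, hi4, hi5⟩ := dF_struct a j hd
    have hrev : ((j - i : ℕ) : Int) ≤ revF a N (i+1) := by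
      have := rev_ge a N (j - i - 1) (i+1) (by omega)
        (fun t ht1 ht2 => hi5 t (by omega) (by omega))
      push_cast at this ⊢; omega
    have hcand : optF a (i-1) + revF a N (i+1) ≤ cF a N (N-2) := by
      have e : (i-1) + 2 = i + 1 := by omega
      have := cand_le_cF a N (m := N-2) (i := i-1) (by omega) (by rw [e]; exact hi3)
      rw [e] at this
      exact this
    omega
  · have h1 := moF_pos a (N-1)
    have h2 : moF a (N-1) ≤ cF a N (N-2) := cF_mono a N (Nat.zero_le _)
    omega

theorem bestF_le_cF (a : ℕ → Int) (N : ℕ) (hN : 2 ≤ N) :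
    bestF a (N-1) ≤ cF a N (N-2) := by
  suffices h : ∀ m, m ≤ N - 1 → bestF a m ≤ cF a N (N-2) by exact h (N-1) (le_refl _)
  intro m
  induction m with
  | zero =>
      intro _
      have h1 := moF_pos a (N-1)
      have h2 : moF a (N-1) ≤ cF a N (N-2) := cF_mono a N (Nat.zero_le _)
      simp [bestF]; omega
  | succ m ih =>
      intro hm
      rw [bestF]
      have h1 := ih (by omega)
      have h2 : optF a (m+1) ≤ cF a N (N-2) := by
        have := opt_le_moF a (m := N-1) (j := m+1) (by omega)
        have h3 : moF a (N-1) ≤ cF a N (N-2) := cF_mono a N (Nat.zero_le _)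
        omega
      have h3 := dF_le_cF a N hN (j := m+1) (by omega)
      omega

theorem cF_le_bestF (a : ℕ → Int) (N : ℕ) (hN : 2 ≤ N) :
    ∀ m, m ≤ N - 2 → cF a N m ≤ bestF a (N-1) := by
  intro m
  induction m with
  | zero => intro _; exact moF_le_bestF a (N-1)
  | succ m ih =>
      intro hm
      rw [cF]
      split_ifs with hc
      · have h1 := ih (by omega)
        have h2 : optF a m + revF a N (m+2) ≤ bestF a (N-1) := by
          have := cand_le_bestF a N (m+1) (by omega) (by omega) hN
            (by simpa [show m + 1 - 1 = m by omega, show m + 1 + 1 = m + 2 by omega] using hc)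
          simpa [show m + 1 - 1 = m by omega, show m + 1 + 1 = m + 2 by omega] using this
        omega
      · exact ih (by omega)

theorem bestF_eq_cF (a : ℕ → Int) (N : ℕ) (h : 1 ≤ N) :
    bestF a (N - 1) = cF a N (N - 2) := by
  rcases Nat.lt_or_ge N 2 with h2 | h2
  · have : N = 1 := by omega
    subst this
    rfl
  · exact le_antisymm (bestF_le_cF a N h2) (cF_le_bestF a N h2 (N-2) (le_refl _))

-- OPT list after A's forward loop has processed i = 1..m
def optList (arr : List Int) (N m : ℕ) : List Int :=
  (List.range N).map (fun j => if j ≤ m then optF (fun t => arr.getD t 0) j else 0)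

-- OPT_reversed list after A's backward loop has processed i = N-2..m' (entries > m' filled)
def revList (arr : List Int) (N : ℕ) (m : Int) : List Int :=
  (List.range N).map (fun (j : ℕ) => if m < (j:Int) then revF (fun t => arr.getD t 0) N j else 0)

theorem getD_optList (arr : List Int) (N m j : ℕ) (hj : j < N) (hjm : j ≤ m) :
    (optList arr N m).getD j 0 = optF (fun t => arr.getD t 0) j := by
  simp [optList, List.getD_eq_getElem?_getD, hj, hjm]

theorem getD_revList (arr : List Int) (N : ℕ) (m : Int) (j : ℕ) (hj : j < N) (hjm : m < (j:Int)) :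
    (revList arr N m).getD j 0 = revF (fun t => arr.getD t 0) N j := by
  simp [revList, List.getD_eq_getElem?_getD, hj, hjm]

theorem set_optList (arr : List Int) (N m : ℕ) (_hm : m + 1 < N) :
    (optList arr N m).set (m+1) (optF (fun t => arr.getD t 0) (m+1)) = optList arr N (m+1) := by
  apply List.ext_getElem (by simp [optList])
  intro j h1 h2
  simp only [optList, List.length_map, List.length_range] at h2
  rw [List.getElem_set]
  simp only [optList, List.getElem_map, List.getElem_range]
  split_ifs with h3 h4 h5 h6 <;> first | rfl | omega | (subst h3; rfl)

theorem set_revList (arr : List Int) (N : ℕ) (k : ℕ) (_hk : k < N) :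
    (revList arr N k).set k (revF (fun t => arr.getD t 0) N k) = revList arr N ((k:Int) - 1) := by
  apply List.ext_getElem (by simp [revList])
  intro j h1 h2
  simp only [revList, List.length_map, List.length_range] at h2
  rw [List.getElem_set]
  simp only [revList, List.getElem_map, List.getElem_range]
  split_ifs with h3 h4 h5 h6 <;> first | rfl | omega | (subst h3; rfl)

theorem init_opt (arr : List Int) (N : ℕ) (_hN : 1 ≤ N) :
    PySem.List.pySetD (List.replicate N (0:Int)) 0 1 = optList arr N 0 := by
  rw [show (0:Int) = ((0:ℕ):Int) by norm_num, PySem.List.pySetD_natCast]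
  apply List.ext_getElem (by simp [optList])
  intro j h1 h2
  simp only [optList, List.getElem_map, List.getElem_range]
  rw [List.getElem_set]
  split_ifs with h3 h4
  · subst h3; simp [optF]
  · omega
  · omega
  · simp [List.getElem_replicate]

theorem init_rev (arr : List Int) (N : ℕ) (hN : 1 ≤ N) :
    PySem.List.pySetD (List.replicate N (0:Int)) ((N:Int) - 1) 1 = revList arr N ((N:Int) - 2) := by
  rw [show ((N:Int) - 1) = ((N-1:ℕ):Int) by omega, PySem.List.pySetD_natCast]
  apply List.ext_getElem (by simp [revList])
  intro j h1 h2
  simp only [revList, List.getElem_map, List.getElem_range]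
  rw [List.getElem_set]
  have hjN : j < N := by simpa [revList] using h2
  split_ifs with h3 h4
  · subst h3; rw [revF]; simp [show N ≤ (N-1)+1 by omega]
  · omega
  · omega
  · simp [List.getElem_replicate]

theorem foldA (arr : List Int) (N : ℕ) (k : ℕ) (hk : k ≤ N - 1) (hN : 1 ≤ N) :
    (PySem.List.pyRange 1 (1 + (k:Int)) 1).foldl
      (fun OPT i =>
        PySem.List.pySetD OPT i
          (if PySem.List.pyGetD arr i 0 > PySem.List.pyGetD arr (i - 1) 0
           then PySem.List.pyGetD OPT (i - 1) 0 + 1 else 1)) (optList arr N 0)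
    = optList arr N k := by
  induction k with
  | zero => rw [show (1 + ((0:ℕ) : Int)) = 1 by norm_num, PySem.List.pyRange_one_eq_nil (by omega)]; rfl
  | succ k ih =>
      rw [show (1 + ((k+1:ℕ) : Int)) = (1 + (k:ℕ)) + 1 by omega,
        PySem.List.pyRange_one_succ_right (by omega), List.foldl_append, ih (by omega)]
      simp only [List.foldl_cons, List.foldl_nil]
      have e1 : (1 + (k:Int)) = ((k+1 : ℕ) : Int) := by omega
      have e2 : (1 + (k:Int)) - 1 = ((k : ℕ) : Int) := by omega
      rw [e2, e1]
      simp only [PySem.List.pyGetD_natCast, PySem.List.pySetD_natCast]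
      rw [getD_optList arr N k k (by omega) (le_refl k)]
      rw [show (if arr.getD (k+1) 0 > arr.getD k 0 then optF (fun t => arr.getD t 0) k + 1 else 1)
           = optF (fun t => arr.getD t 0) (k+1) by rw [optF]]
      exact set_optList arr N k (by omega)

theorem foldR (arr : List Int) (N : ℕ) (k : ℕ) (hk : k ≤ N - 1) (hN : 1 ≤ N) :
    (PySem.List.pyRange ((k:Int) - 1) (-1) (-1)).foldl
      (fun REV i =>
        PySem.List.pySetD REV i
          (if PySem.List.pyGetD arr i 0 < PySem.List.pyGetD arr (i + 1) 0
           then PySem.List.pyGetD REV (i + 1) 0 + 1 else 1)) (revList arr N ((k:Int) - 1))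
    = revList arr N (-1) := by
  induction k with
  | zero => rw [show ((0:ℕ):Int) - 1 = -1 by norm_num, PySem.List.pyRange_neg_one_eq_nil (by omega)]; rfl
  | succ k ih =>
      rw [show ((k+1:ℕ):Int) - 1 = (k:Int) by omega,
        PySem.List.pyRange_neg_one_cons (by omega)]
      simp only [List.foldl_cons]
      have e1 : (k:Int) + 1 = ((k+1 : ℕ) : Int) := by omega
      rw [e1]
      simp only [PySem.List.pyGetD_natCast, PySem.List.pySetD_natCast]
      rw [getD_revList arr N ((k:Int)) (k+1) (by omega) (by omega)]
      rw [show (if arr.getD k 0 < arr.getD (k+1) 0 then revF (fun t => arr.getD t 0) N (k+1) + 1 else 1)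
           = revF (fun t => arr.getD t 0) N k by
             conv_rhs => rw [revF.eq_def]
             simp [show ¬ (N ≤ k+1) by omega]]
      rw [set_revList arr N k (by omega)]
      exact ih (by omega)

theorem foldl_max_opt (a : ℕ → Int) (M : ℕ) :
    ((List.range M).map (fun k => optF a (k+1))).foldl max (optF a 0) = moF a M := by
  induction M with
  | zero => simp [moF, optF]
  | succ M ih => rw [List.range_succ, List.map_append, List.foldl_append, ih]; simp [moF]

theorem max_optList (arr : List Int) (N : ℕ) (hN : 1 ≤ N) :
    (PySem.List.max? (optList arr N (N-1)) (fun y => y)).getD 0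
      = moF (fun t => arr.getD t 0) (N-1) := by
  obtain ⟨M, rfl⟩ : ∃ M, N = M + 1 := ⟨N - 1, by omega⟩
  have : optList arr (M+1) M
      = optF (fun t => arr.getD t 0) 0 :: (List.range M).map (fun k => optF (fun t => arr.getD t 0) (k+1)) := by
    rw [optList, List.range_succ_eq_map]
    simp [List.map_map, Function.comp_def]
    omega
  simp only [Nat.add_sub_cancel]
  rw [this, PySem.List.max?_id_cons, Option.getD_some, foldl_max_opt]

theorem foldC (arr : List Int) (N : ℕ) (k : ℕ) (hk : k ≤ N - 2) (hN : 1 ≤ N) :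
    (PySem.List.pyRange 1 (1 + (k:Int)) 1).foldl
      (fun m i =>
        if PySem.List.pyGetD arr (i - 1) 0 < PySem.List.pyGetD arr (i + 1) 0
        then max m (PySem.List.pyGetD (optList arr N (N-1)) (i - 1) 0
              + PySem.List.pyGetD (revList arr N (-1)) (i + 1) 0)
        else m) (moF (fun t => arr.getD t 0) (N-1))
    = cF (fun t => arr.getD t 0) N k := by
  induction k with
  | zero => rw [show (1 + ((0:ℕ) : Int)) = 1 by norm_num, PySem.List.pyRange_one_eq_nil (by omega)]; rfl
  | succ k ih =>
      rw [show (1 + ((k+1:ℕ) : Int)) = (1 + (k:ℕ)) + 1 by omega,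
        PySem.List.pyRange_one_succ_right (by omega), List.foldl_append, ih (by omega)]
      simp only [List.foldl_cons, List.foldl_nil]
      rw [show (1 + (k:Int)) - 1 = ((k : ℕ) : Int) by omega,
        show (1 + (k:Int)) + 1 = ((k+2 : ℕ) : Int) by omega]
      simp only [PySem.List.pyGetD_natCast]
      rw [getD_optList arr N (N-1) k (by omega) (by omega),
        getD_revList arr N (-1) (k+2) (by omega) (by omega)]
      rfl

theorem portA_eq (arr : List Int) (N : ℕ) (h : 1 ≤ N) :
    maxIncSubarr arr (N : Int) = cF (fun j => arr.getD j 0) N (N - 2) := by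
  simp only [maxIncSubarr, Int.toNat_natCast]
  rw [init_opt arr N h, init_rev arr N h,
    show PySem.List.pyRange 1 (N:Int) 1 = PySem.List.pyRange 1 (1 + ((N-1:ℕ):Int)) 1 by
      rw [show (N:Int) = 1 + ((N-1:ℕ):Int) by omega],
    foldA arr N (N-1) (by omega) h,
    show ((N:Int) - 2) = ((N-1:ℕ):Int) - 1 by omega,
    foldR arr N (N-1) (by omega) h,
    max_optList arr N h]
  rcases Nat.lt_or_ge N 2 with h2 | h2
  · have hN1 : N = 1 := by omega
    subst hN1
    rw [PySem.List.pyRange_one_eq_nil (by norm_num : ((1:ℕ):Int) - 1 ≤ 1)]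
    rfl
  · rw [show ((N:ℕ):Int) - 1 = 1 + ((N-2:ℕ):Int) by omega]
    exact foldC arr N (N-2) (le_refl _) h

def prevB (a : ℕ → Int) : ℕ → Int
  | 0 => 0
  | k+1 => optF a k

theorem foldB (arr : List Int) (k : ℕ) :
    (PySem.List.pyRange 1 (1 + (k : Int)) 1).foldl
      (fun (s : Int × Int × Int × Int) i =>
        let best := s.1
        let cur := s.2.1
        let dele := s.2.2.1
        let prev_cur := s.2.2.2
        let newDel0 : Int :=
          if 0 < dele ∧ PySem.List.pyGetD arr i 0 > PySem.List.pyGetD arr (i - 1) 0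
          then dele + 1 else 0
        let newDel : Int :=
          if 2 ≤ i ∧ PySem.List.pyGetD arr i 0 > PySem.List.pyGetD arr (i - 2) 0
          then max newDel0 (prev_cur + 1) else newDel0
        let newCur : Int :=
          if PySem.List.pyGetD arr i 0 > PySem.List.pyGetD arr (i - 1) 0
          then cur + 1 else 1
        (max (max best newCur) newDel, newCur, newDel, cur))
      (1, 1, 0, 0)
    = (bestF (fun j => arr.getD j 0) k, optF (fun j => arr.getD j 0) k,
       dF (fun j => arr.getD j 0) k, prevB (fun j => arr.getD j 0) k) := by
  induction k with
  | zero =>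
      rw [show (1 + ((0:ℕ) : Int)) = 1 by norm_num, PySem.List.pyRange_one_eq_nil (by omega)]
      simp [bestF, optF, dF, prevB]
  | succ k ih =>
      rw [show (1 + ((k+1:ℕ) : Int)) = (1 + (k:ℕ)) + 1 by omega,
        PySem.List.pyRange_one_succ_right (by omega), List.foldl_append, ih]
      simp only [List.foldl_cons, List.foldl_nil]
      have e1 : (1 + (k:Int)) = ((k+1 : ℕ) : Int) := by omega
      have e2 : (1 + (k:Int)) - 1 = ((k : ℕ) : Int) := by omega
      have g1 : PySem.List.pyGetD arr (1 + (k:Int)) 0 = arr.getD (k+1) 0 := by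
        rw [e1, PySem.List.pyGetD_natCast]
      have g2 : PySem.List.pyGetD arr ((1 + (k:Int)) - 1) 0 = arr.getD k 0 := by
        rw [e2, PySem.List.pyGetD_natCast]
      match k with
      | 0 =>
          simp only [g1, g2]
          simp [bestF, optF, dF, prevB]
      | k+1 =>
          have g3 : PySem.List.pyGetD arr ((1 + ((k+1:ℕ)):Int) - 2) 0 = arr.getD k 0 := by
            rw [show ((1 + ((k+1:ℕ)):Int) - 2) = ((k:ℕ) : Int) by push_cast; ring,
              PySem.List.pyGetD_natCast]
          simp only [g1, g2, g3, gt_iff_lt]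
          have h2 : (2:Int) ≤ 1 + ((k:Int) + 1) := by omega
          simp [h2, bestF, optF, dF, prevB]


theorem portB_eq (arr : List Int) (N : ℕ) (h : 1 ≤ N) :
    maxIncSubarr_alt arr (N : Int) = bestF (fun j => arr.getD j 0) (N - 1) := by
  unfold maxIncSubarr_alt
  rw [show ((N:ℕ) : Int) = 1 + ((N - 1 : ℕ) : Int) by omega, foldB]

-- ===== VERDICT (by name: the statement is the Claim_ definition above) =====
theorem maxIncSubarr_spec : Claim_equal_maxIncSubarr := by
  intro arr n _ hpre
  obtain ⟨h1, _⟩ := hpre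
  obtain ⟨N, rfl⟩ : ∃ N : ℕ, n = (N : Int) := ⟨n.toNat, (Int.toNat_of_nonneg (by omega)).symm⟩
  have hN : 1 ≤ N := by exact_mod_cast h1
  show maxIncSubarr arr N = maxIncSubarr_alt arr N
  rw [portA_eq arr N hN, portB_eq arr N hN, bestF_eq_cF _ N hN]
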